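-- pv_equiv track=rewrite | github.com/carlosalevela/Ali_back | test_grado9/views.py | _ultima_pregunta
-- ===== SOURCE A (Python) =====
-- TOTAL_PREGUNTAS = 57
--
-- RESP_VALIDAS = {"Me encanta", "Me interesa", "No me gusta"}   # nuevas opciones
--
-- MAP_A_B_C = {"A": "Me encanta", "B": "Me interesa", "C": "No me gusta", "D": None}
--
-- def _ultima_pregunta(respuestas: dict) -> int:
--     if not isinstance(respuestas, dict):
--         return 0
--     last = 0
--     for i in range(1, TOTAL_PREGUNTAS + 1):
--         r = respuestas.get(f"pregunta_{i}")
--         if r is None: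
--             continue
--         r = str(r).strip()
--         if r in RESP_VALIDAS or (r in MAP_A_B_C and MAP_A_B_C[r] in RESP_VALIDAS):
--             last = i
--     return last
-- ===== SOURCE B (Python) =====
-- TOTAL_PREGUNTAS = 57
--
-- RESP_VALIDAS = {"Me encanta", "Me interesa", "No me gusta"}
--
-- # literal letters that map (via MAP_A_B_C) to a valid answer; "D" maps to None, so it is not one
-- LETRAS_VALIDAS = {"A", "B", "C"}
--
--
-- def _ultima_pregunta(respuestas: dict) -> int:
--     if not isinstance(respuestas, dict):
--         return 0
--     # reverse early-exit search: first valid question from the top IS the highest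
--     for i in range(TOTAL_PREGUNTAS, 0, -1):
--         r = respuestas.get(f"pregunta_{i}")
--         if r is None:
--             continue
--         r = str(r).strip()
--         if r in RESP_VALIDAS or r in LETRAS_VALIDAS:
--             return i
--     return 0
-- ===== Notes on version B (the rewrite author's own statement) =====
-- stated objective: alternative
-- what changed: Replaces the forward sweep with a 'last' accumulator by a reverse early-exit search from question 57 down, returning the first index whose answer is valid (validity folded to a direct membership test, since only A/B/C map to valid answers), 0 if none.
import Mathlib
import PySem

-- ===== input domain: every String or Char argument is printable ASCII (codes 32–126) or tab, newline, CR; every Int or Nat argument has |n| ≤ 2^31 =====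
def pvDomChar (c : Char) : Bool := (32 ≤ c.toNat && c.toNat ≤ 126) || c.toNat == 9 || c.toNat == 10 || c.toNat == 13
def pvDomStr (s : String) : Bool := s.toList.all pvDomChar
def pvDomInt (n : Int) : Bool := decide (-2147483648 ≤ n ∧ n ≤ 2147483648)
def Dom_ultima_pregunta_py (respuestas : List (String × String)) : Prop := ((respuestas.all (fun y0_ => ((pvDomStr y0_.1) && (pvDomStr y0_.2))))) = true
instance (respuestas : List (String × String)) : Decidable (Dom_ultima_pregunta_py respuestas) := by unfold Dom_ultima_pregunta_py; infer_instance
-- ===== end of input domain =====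

-- B replaces A's forward sweep with a `last` accumulator by a reverse early-exit
-- search (first valid index from 57 down); same return value, no speed claim.

-- ===== PORT A =====
-- r in RESP_VALIDAS
def pvInValidas (r : String) : Bool :=
  r == "Me encanta" || r == "Me interesa" || r == "No me gusta"

-- MAP_A_B_C.get? : some (some v) for A/B/C, some none for D, none otherwise
def pvMapABC (r : String) : Option (Option String) :=
  if r == "A" then some (some "Me encanta")
  else if r == "B" then some (some "Me interesa")
  else if r == "C" then some (some "No me gusta")
  else if r == "D" then some none
  else none

-- the condition of A's `if`, on the stripped string
def pvCondA (r : String) : Bool :=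
  pvInValidas r ||
    (match pvMapABC r with
     | some v => (match v with | some s => pvInValidas s | none => false)
     | none => false)

-- the body of A's for-loop (continue on missing key, update `last` on valid)
def pvStepA (d : PySem.Dict String String) (last : Int) (i : Int) : Int :=
  match d.get? ("pregunta_" ++ PySem.Int.toStr i) with
  | none => last
  | some r0 => if pvCondA (PySem.Str.strip r0) then i else last

def ultima_pregunta_py (respuestas : List (String × String)) : Int :=
  (PySem.List.pyRange 1 (57 + 1) 1).foldl (pvStepA (PySem.Dict.ofList respuestas)) 0

-- ===== PORT B =====
-- r in RESP_VALIDAS or r in LETRAS_VALIDAS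
def pvValidB (r : String) : Bool :=
  (r == "Me encanta" || r == "Me interesa" || r == "No me gusta") ||
  (r == "A" || r == "B" || r == "C")

-- the reverse search: try question k, return it if valid, else recurse downward
def pvGoB (d : PySem.Dict String String) : Nat → Int
  | 0 => 0
  | k + 1 =>
    match d.get? ("pregunta_" ++ PySem.Int.toStr ((k : Int) + 1)) with
    | none => pvGoB d k
    | some r0 =>
      if pvValidB (PySem.Str.strip r0) then (k : Int) + 1 else pvGoB d k

def ultima_pregunta_py_alt (respuestas : List (String × String)) : Int :=
  pvGoB (PySem.Dict.ofList respuestas) 57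

-- ===== PRECONDITION & SPEC =====
def Spec_ultima_pregunta_py (respuestas : List (String × String)) (out : Int) : Prop := out = ultima_pregunta_py_alt respuestas
instance (respuestas : List (String × String)) (out : Int) : Decidable (Spec_ultima_pregunta_py respuestas out) := by unfold Spec_ultima_pregunta_py; infer_instance

-- ===== CLAIM (what is proved, stated in full; the proofs are below) =====
def Claim_equal_ultima_pregunta_py : Prop := ∀ (respuestas : List (String × String)), Dom_ultima_pregunta_py respuestas → Spec_ultima_pregunta_py respuestas (ultima_pregunta_py respuestas)

-- ===== LEMMAS AND PROOFS =====

-- the two validity tests agree letter by letter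
theorem pvCondA_eq_pvValidB (r : String) : pvCondA r = pvValidB r := by
  unfold pvCondA pvMapABC pvInValidas pvValidB
  by_cases hA : r = "A" <;> by_cases hB : r = "B" <;> by_cases hC : r = "C" <;>
    by_cases hD : r = "D" <;> simp_all

-- the forward accumulator sweep up to n equals the reverse early-exit search from n
theorem pv_loop_eq (d : PySem.Dict String String) :
    ∀ n : Nat, (PySem.List.pyRange 1 ((n : Int) + 1) 1).foldl (pvStepA d) 0 = pvGoB d n := by
  intro n
  induction n with
  | zero => simp [PySem.List.pyRange_one_eq_nil, pvGoB]
  | succ k ih =>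
    have h : ((k : Int) + 1 + 1) = (((k + 1 : Nat) : Int) + 1) := by push_cast; ring
    rw [← h, PySem.List.pyRange_one_succ_right (by omega), List.foldl_append, ih]
    simp only [List.foldl, pvGoB, pvStepA, pvCondA_eq_pvValidB]

-- ===== VERDICT (by name: the statement is the Claim_ definition above) =====
theorem ultima_pregunta_py_spec : Claim_equal_ultima_pregunta_py := by
  intro respuestas _
  unfold Spec_ultima_pregunta_py ultima_pregunta_py ultima_pregunta_py_alt
  have := pv_loop_eq (PySem.Dict.ofList respuestas) 57
  norm_num at this ⊢
  exact this
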